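-- pv_equiv track=rewrite | github.com/sosomalouf0606-hue/EP2---Maria-Sofia-e-Mariana-Yunes | EP2/funcoes.py | calcula_pontos_regra_simples
-- ===== SOURCE A (Python) =====
-- def calcula_pontos_regra_simples(lista_dados):
--     dic_pontos={}
--     for dado in range(1,7):
--         dic_pontos[dado]=0
--         for i in lista_dados:
--             if i==dado:
--                 dic_pontos[dado]+=i
--     return dic_pontos
-- ===== SOURCE B (Python) =====
-- def calcula_pontos_regra_simples(lista_dados):
--     dic_pontos = {d: 0 for d in range(1, 7)}
--     for i in lista_dados:
--         if i in (1, 2, 3, 4, 5, 6):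
--             dic_pontos[i] += i
--     return dic_pontos
-- ===== Notes on version B (the rewrite author's own statement) =====
-- stated objective: simpler
-- what changed: B pre-initializes the six buckets with a dict comprehension and makes a single pass over lista_dados dispatching each die value to its bucket, instead of A's six full scans of the list (one per die value).
import Mathlib
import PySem

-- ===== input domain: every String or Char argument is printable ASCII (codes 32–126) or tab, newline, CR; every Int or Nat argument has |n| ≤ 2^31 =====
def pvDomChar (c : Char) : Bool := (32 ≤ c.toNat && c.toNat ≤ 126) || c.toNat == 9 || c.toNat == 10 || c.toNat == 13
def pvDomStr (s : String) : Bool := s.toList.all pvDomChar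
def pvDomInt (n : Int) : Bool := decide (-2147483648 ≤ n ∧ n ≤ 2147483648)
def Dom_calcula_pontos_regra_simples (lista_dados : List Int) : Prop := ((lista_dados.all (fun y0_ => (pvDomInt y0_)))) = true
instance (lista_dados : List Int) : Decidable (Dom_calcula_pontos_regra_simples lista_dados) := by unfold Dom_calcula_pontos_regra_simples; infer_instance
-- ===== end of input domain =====

-- B replaces A's six full scans of the list (one per die value 1..6) by one pre-initialized
-- six-bucket dict and a single pass over the list (objective: simpler; a single pass instead of six scans).

-- ===== PORT A =====
-- for dado in range(1,7): dic[dado]=0; for i in lista: if i==dado: dic[dado]+=i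
def calcula_pontos_regra_simples (lista_dados : List Int) : List (Int × Int) :=
  ((PySem.List.pyRange 1 7 1).foldl
    (fun d dado =>
      lista_dados.foldl
        (fun d i => if i == dado then d.modify dado 0 (· + i) else d)
        (d.insert dado 0))
    PySem.Dict.empty).items

-- ===== PORT B =====
-- dic = {d: 0 for d in range(1,7)}; for i in lista: if i in (1,..,6): dic[i]+=i
def calcula_pontos_regra_simples_alt (lista_dados : List Int) : List (Int × Int) :=
  (lista_dados.foldl
    (fun d i =>
      if i == 1 || i == 2 || i == 3 || i == 4 || i == 5 || i == 6
      then d.modify i 0 (· + i) else d)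
    ((PySem.List.pyRange 1 7 1).foldl (fun d dado => d.insert dado 0) PySem.Dict.empty)).items

-- ===== PRECONDITION & SPEC =====
def Spec_calcula_pontos_regra_simples (lista_dados : List Int) (out : List (Int × Int)) : Prop := out = calcula_pontos_regra_simples_alt lista_dados
instance (lista_dados : List Int) (out : List (Int × Int)) : Decidable (Spec_calcula_pontos_regra_simples lista_dados out) := by unfold Spec_calcula_pontos_regra_simples; infer_instance

-- ===== CLAIM (what is proved, stated in full; the proofs are below) =====
def Claim_equal_calcula_pontos_regra_simples : Prop := ∀ (lista_dados : List Int), Dom_calcula_pontos_regra_simples lista_dados → Spec_calcula_pontos_regra_simples lista_dados (calcula_pontos_regra_simples lista_dados)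

-- ===== LEMMAS AND PROOFS =====

-- per-value sum, the common characterisation of both loops' bucket value
def pvS (dado : Int) (l : List Int) : Int :=
  l.foldl (fun s i => if i == dado then s + i else s) 0

theorem pvS_shift (dado : Int) : ∀ (l : List Int) (a b : Int),
    l.foldl (fun s i => if i == dado then s + i else s) (a + b)
      = a + l.foldl (fun s i => if i == dado then s + i else s) b
  | [], _, _ => by simp
  | x :: xs, a, b => by
    simp only [List.foldl_cons]
    by_cases hx : (x == dado) = true
    · rw [if_pos hx, if_pos hx, add_assoc, pvS_shift dado xs a (b + x)]
    · rw [if_neg hx, if_neg hx, pvS_shift dado xs a b]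

theorem pvS_cons (dado i : Int) (l : List Int) :
    pvS dado (i :: l) = (if i = dado then i else 0) + pvS dado l := by
  unfold pvS
  simp only [List.foldl_cons]
  by_cases hi : i = dado
  · rw [if_pos (by simpa using hi), if_pos hi, zero_add]
    simpa using pvS_shift dado l i 0
  · rw [if_neg (by simpa using hi), if_neg hi, zero_add]

-- A's inner loop starting from a dict whose key `dado` was just set to v
theorem innerA (dado : Int) (l : List Int) :
    ∀ (d : PySem.Dict Int Int) (v : Int),
      l.foldl (fun d i => if i == dado then d.modify dado 0 (· + i) else d) (d.insert dado v)
        = d.insert dado (v + pvS dado l) := by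
  induction l with
  | nil => intro d v; simp [pvS]
  | cons i rest ih =>
    intro d v
    simp only [List.foldl_cons]
    by_cases hi : i = dado
    · have hstep : ((d.insert dado v).modify dado 0 (· + i)) = d.insert dado (v + i) := by
        simp [PySem.Dict.modify, PySem.Dict.getD_insert_self, PySem.Dict.insert_insert_self]
      rw [if_pos (by simpa using hi), hstep, ih, pvS_cons, if_pos hi, hi, add_assoc]
    · rw [if_neg (by simpa using hi), ih, pvS_cons, if_neg hi, zero_add]

-- B's loop: getD of any key k ∈ {1..6} after the single pass
theorem innerB_getD (k : Int) (hk : k = 1 ∨ k = 2 ∨ k = 3 ∨ k = 4 ∨ k = 5 ∨ k = 6)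
    (l : List Int) :
    ∀ (d : PySem.Dict Int Int),
      (l.foldl (fun d i =>
          if i == 1 || i == 2 || i == 3 || i == 4 || i == 5 || i == 6
          then d.modify i 0 (· + i) else d) d).getD k 0
        = d.getD k 0 + pvS k l := by
  induction l with
  | nil => intro d; simp [pvS]
  | cons i rest ih =>
    intro d
    simp only [List.foldl_cons]
    by_cases hm : i = 1 ∨ i = 2 ∨ i = 3 ∨ i = 4 ∨ i = 5 ∨ i = 6
    · rw [if_pos (by rcases hm with h|h|h|h|h|h <;> simp [h]), ih,
        PySem.Dict.getD_modify, pvS_cons]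
      by_cases hik : k = i
      · subst hik; simp [add_comm, add_assoc, add_left_comm]
      · rw [if_neg hik, if_neg (fun h => hik h.symm), zero_add]
    · rw [if_neg (by simp only [Bool.or_eq_true, beq_iff_eq]; tauto), ih, pvS_cons,
        if_neg (fun h => hm (by rw [h]; exact hk)), zero_add]

-- B's loop never changes the key list (all touched keys are already present)
theorem innerB_keys (l : List Int) :
    ∀ (d : PySem.Dict Int Int),
      (∀ k : Int, (k = 1 ∨ k = 2 ∨ k = 3 ∨ k = 4 ∨ k = 5 ∨ k = 6) → d.contains k = true) →
      (l.foldl (fun d i =>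
          if i == 1 || i == 2 || i == 3 || i == 4 || i == 5 || i == 6
          then d.modify i 0 (· + i) else d) d).keys = d.keys := by
  induction l with
  | nil => intro d _; rfl
  | cons i rest ih =>
    intro d hd
    simp only [List.foldl_cons]
    by_cases hm : i = 1 ∨ i = 2 ∨ i = 3 ∨ i = 4 ∨ i = 5 ∨ i = 6
    · rw [if_pos (by rcases hm with h|h|h|h|h|h <;> simp [h])]
      have hc : d.contains i = true := hd i hm
      have hkeys : (d.modify i 0 (· + i)).keys = d.keys := by
        rw [PySem.Dict.keys_modify, PySem.Dict.keys_insert_of_contains d _ hc]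
      rw [ih _ (fun k hk => by simp [PySem.Dict.contains_modify, hd k hk]), hkeys]
    · rw [if_neg (by simp only [Bool.or_eq_true, beq_iff_eq]; tauto)]
      exact ih d hd

-- ===== VERDICT (by name: the statement is the Claim_ definition above) =====
theorem calcula_pontos_regra_simples_spec : Claim_equal_calcula_pontos_regra_simples := by
  intro lista_dados _
  unfold Spec_calcula_pontos_regra_simples
  unfold calcula_pontos_regra_simples calcula_pontos_regra_simples_alt
  have hrange : PySem.List.pyRange 1 7 1 = [1, 2, 3, 4, 5, 6] := by decide
  rw [hrange]
  -- A side: six explicit inserts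
  simp only [List.foldl_cons, List.foldl_nil, innerA, zero_add]
  set dB : PySem.Dict Int Int :=
      (((((PySem.Dict.empty.insert 1 0).insert 2 0).insert 3 0).insert 4 0).insert 5 0).insert 6 0
      with hdB
  have hcont : ∀ k : Int, (k = 1 ∨ k = 2 ∨ k = 3 ∨ k = 4 ∨ k = 5 ∨ k = 6) →
      dB.contains k = true := by
    intro k hk; rcases hk with h|h|h|h|h|h <;> subst h <;> (rw [hdB]; decide)
  set dB' : PySem.Dict Int Int := lista_dados.foldl
      (fun d i => if i == 1 || i == 2 || i == 3 || i == 4 || i == 5 || i == 6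
                  then d.modify i 0 (· + i) else d) dB with hdB'
  have hkeys' : dB'.keys = [1, 2, 3, 4, 5, 6] := by
    rw [hdB', innerB_keys lista_dados dB hcont, hdB]; decide
  have hnd : dB'.keys.Nodup := by rw [hkeys']; decide
  have hitems := PySem.Dict.items_eq_map_keys dB' hnd 0
  rw [hkeys'] at hitems
  have hg : ∀ k : Int, (k = 1 ∨ k = 2 ∨ k = 3 ∨ k = 4 ∨ k = 5 ∨ k = 6) →
      dB'.getD k 0 = pvS k lista_dados := by
    intro k hk
    rw [hdB', innerB_getD k hk lista_dados dB]
    have hz : dB.getD k 0 = 0 := by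
      rcases hk with h|h|h|h|h|h <;> subst h <;> (rw [hdB]; decide)
    rw [hz, zero_add]
  rw [hitems]
  simp only [List.map_cons, List.map_nil]
  rw [hg 1 (by tauto), hg 2 (by tauto), hg 3 (by tauto), hg 4 (by tauto),
      hg 5 (by tauto), hg 6 (by tauto)]
  -- A's explicit insert chain has items exactly these six pairs
  simp [PySem.Dict.items_insert, PySem.Dict.contains_insert, PySem.Dict.empty]
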